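-- pv_equiv track=rewrite | github.com/zooko/rebar | addallocatorvariants.py | process_engines_array
-- ===== SOURCE A (Python) =====
-- VARIANTS = [
--     "rust/regex-mimalloc",
--     "rust/regex-jemalloc",
--     "rust/regex-smalloc",
--     "rust/regex-rpmalloc",
--     "rust/regex-snmalloc",
-- ]
--
-- def process_engines_array(engines):
--     """Add variants to an engines array if rust/regex is present."""
--     if 'rust/regex' not in engines:
--         return False
--
--     modified = False
--     idx = list(engines).index('rust/regex') + 1
--
--     for variant in reversed(VARIANTS):
--         if variant not in engines:
--             engines.insert(idx, variant)
--             modified = True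
--
--     return modified
-- ===== SOURCE B (Python) =====
-- VARIANTS = [
--     "rust/regex-mimalloc",
--     "rust/regex-jemalloc",
--     "rust/regex-smalloc",
--     "rust/regex-rpmalloc",
--     "rust/regex-snmalloc",
-- ]
--
-- def process_engines_array(engines):
--     """Add variants to an engines array if rust/regex is present."""
--     present = set(engines)
--     if 'rust/regex' not in present:
--         return False
--     out = []
--     done = False
--     for e in engines:
--         out.append(e)
--         if not done and e == 'rust/regex':
--             out.extend(v for v in VARIANTS if v not in present)
--             done = True
--     grew = len(out) != len(engines)
--     engines[:] = out
--     return grew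
-- ===== Notes on version B (the rewrite author's own statement) =====
-- stated objective: alternative
-- what changed: Instead of A's reversed loop of index-based insert calls that re-checks membership against the mutated list, B precomputes a membership set, rebuilds the list in one forward pass emitting the missing variants right after rust/regex, and returns whether the rebuilt list grew.
import Mathlib
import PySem

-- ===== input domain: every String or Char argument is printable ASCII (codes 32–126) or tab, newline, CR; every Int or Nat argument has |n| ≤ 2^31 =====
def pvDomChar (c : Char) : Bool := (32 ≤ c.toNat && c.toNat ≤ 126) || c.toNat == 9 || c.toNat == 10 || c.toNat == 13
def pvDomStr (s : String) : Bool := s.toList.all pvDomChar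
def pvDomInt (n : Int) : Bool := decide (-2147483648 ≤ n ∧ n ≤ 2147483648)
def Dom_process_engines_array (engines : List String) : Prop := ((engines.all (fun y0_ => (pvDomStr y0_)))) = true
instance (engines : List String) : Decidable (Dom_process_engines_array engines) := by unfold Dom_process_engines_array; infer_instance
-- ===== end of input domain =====

-- B rebuilds the list in one pass over a precomputed membership set (emitting the missing
-- variants right after rust/regex) and returns whether the rebuilt list grew, instead of A's
-- reversed loop of index-based single inserts re-scanning the mutated list; equivalence is
-- about the RETURN value only — both Python versions leave `engines` in the same final state.


def pvVariants : List String := [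
  "rust/regex-mimalloc",
  "rust/regex-jemalloc",
  "rust/regex-smalloc",
  "rust/regex-rpmalloc",
  "rust/regex-snmalloc"]

-- ===== PORT A =====
-- reversed loop: each missing variant is inserted at idx into the evolving list
def process_engines_array (engines : List String) : Bool :=
  if "rust/regex" ∈ engines then
    let idx : Int := ((PySem.List.index? engines "rust/regex").getD 0 : Int) + 1
    (pvVariants.reverse.foldl
      (fun (st : List String × Bool) v =>
        if v ∈ st.1 then st else (PySem.List.insert st.1 idx v, true))
      (engines, false)).2
  else false

-- ===== PORT B =====
-- one rebuild pass over engines, emitting the missing variants after the first rust/regex;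
-- returns whether the rebuilt list is longer than the original
def process_engines_array_alt (engines : List String) : Bool :=
  let present : PySem.Set String := PySem.Set.ofList engines
  if PySem.Set.contains present "rust/regex" then
    let st := engines.foldl
      (fun (st : List String × Bool) e =>
        let out := st.1 ++ [e]
        if !st.2 && (e == "rust/regex") then
          (out ++ pvVariants.filter (fun v => !(PySem.Set.contains present v)), true)
        else (out, st.2))
      ([], false)
    decide (st.1.length ≠ engines.length)
  else false

-- ===== PRECONDITION & SPEC =====
def Spec_process_engines_array (engines : List String) (out : Bool) : Prop := out = process_engines_array_alt engines
instance (engines : List String) (out : Bool) : Decidable (Spec_process_engines_array engines out) := by unfold Spec_process_engines_array; infer_instance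

-- ===== CLAIM =====
def Claim_equal_process_engines_array : Prop := ∀ (engines : List String), Dom_process_engines_array engines → Spec_process_engines_array engines (process_engines_array engines)

-- ===== LEMMAS AND PROOFS =====
theorem mem_pyInsert (l : List String) (i : Int) (v x : String) :
    x ∈ PySem.List.insert l i v ↔ x = v ∨ x ∈ l := by
  simp only [PySem.List.insert, List.mem_append, List.mem_cons]
  rw [or_left_comm, ← List.mem_append, List.take_append_drop]

-- the modified flag produced by A's loop is: initial flag OR some remaining variant absent
theorem loop_flag (engines : List String) (i : Int) :
    ∀ (vs l : List String) (b : Bool), vs.Nodup →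
    (∀ v ∈ vs, (v ∈ l ↔ v ∈ engines)) →
    (vs.foldl
      (fun (st : List String × Bool) v =>
        if v ∈ st.1 then st else (PySem.List.insert st.1 i v, true))
      (l, b)).2 = (b || vs.any (fun v => !(engines.contains v))) := by
  intro vs
  induction vs with
  | nil => intro l b _ _; simp
  | cons v vs ih =>
    intro l b hnd h
    have hnd' := hnd.of_cons
    have hv := h v (by simp)
    by_cases hvl : v ∈ l
    · have hve : v ∈ engines := hv.1 hvl
      rw [List.foldl_cons, if_pos hvl, ih l b hnd' (fun u hu => h u (by simp [hu]))]
      simp [hve]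
    · have hve : v ∉ engines := fun hc => hvl (hv.2 hc)
      rw [List.foldl_cons, if_neg hvl]
      rw [ih (PySem.List.insert l i v) true hnd' ?_]
      · simp [hve]
      · intro u hu
        have huv : u ≠ v := fun he => (List.nodup_cons.1 hnd).1 (he ▸ hu)
        rw [mem_pyInsert]
        simp [huv]
        exact h u (by simp [hu])

-- abbreviation for B's loop body, parameterised by the extension list
def pvStep (ext : List String) (st : List String × Bool) (e : String) : List String × Bool :=
  let out := st.1 ++ [e]
  if !st.2 && (e == "rust/regex") then (out ++ ext, true) else (out, st.2)

-- once done=true, the rebuild pass only appends the remaining elements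
theorem rebuild_done (ext : List String) :
    ∀ (l acc : List String),
    (l.foldl (pvStep ext) (acc, true)) = (acc ++ l, true) := by
  intro l
  induction l with
  | nil => intro acc; simp
  | cons e l ih => intro acc; simp [pvStep, ih]

-- with done=false and rust/regex present, the final length is |acc| + |l| + |ext|
theorem rebuild_len (ext : List String) :
    ∀ (l acc : List String), "rust/regex" ∈ l →
    (l.foldl (pvStep ext) (acc, false)).1.length = acc.length + l.length + ext.length := by
  intro l
  induction l with
  | nil => intro acc h; simp at h
  | cons e l ih =>
    intro acc h
    by_cases he : e = "rust/regex"
    · simp [pvStep, he, rebuild_done]; omega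
    · have hl : "rust/regex" ∈ l := by
        rcases List.mem_cons.1 h with h' | h'
        · exact absurd h'.symm he
        · exact h'
      simp [pvStep, he, ih _ hl]; omega

theorem filter_len_zero (p : String → Bool) (l : List String) :
    ((l.filter p).length = 0) ↔ (l.any p = false) := by
  induction l with
  | nil => simp
  | cons a l ih => cases hp : p a <;> simp [hp, ih]

-- ===== VERDICT =====
theorem process_engines_array_spec : Claim_equal_process_engines_array := by
  intro engines _
  unfold Spec_process_engines_array process_engines_array process_engines_array_alt
  have hmem : ∀ x : String, PySem.Set.contains (PySem.Set.ofList engines) x = engines.contains x := by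
    intro x
    simp [PySem.Set.contains, PySem.Set.mem_ofList]
  by_cases h : "rust/regex" ∈ engines
  · have hc : PySem.Set.contains (PySem.Set.ofList engines) "rust/regex" = true := by
      simp [h]
    rw [if_pos h, if_pos hc]
    rw [loop_flag engines _ pvVariants.reverse engines false
        (by rw [List.nodup_reverse]; decide) (fun _ _ => Iff.rfl)]
    show _ = decide ((engines.foldl (pvStep _) ([], false)).1.length ≠ engines.length)
    rw [rebuild_len _ engines [] h]
    have hf : (fun v => !(PySem.Set.contains (PySem.Set.ofList engines) v))
        = (fun v => !(engines.contains v)) := by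
      funext v; rw [hmem]
    rw [hf]
    simp only [List.length_nil, Nat.zero_add, List.any_reverse, Bool.false_or]
    have hiff := filter_len_zero (fun v => !(engines.contains v)) pvVariants
    cases ha : pvVariants.any (fun v => !(engines.contains v)) with
    | false =>
      have h0 : (pvVariants.filter (fun v => !(engines.contains v))).length = 0 := hiff.2 ha
      rw [h0]; simp
    | true =>
      have hlen : (pvVariants.filter (fun v => !(engines.contains v))).length ≠ 0 := by
        intro h0
        rw [hiff.1 h0] at ha
        cases ha
      symm
      rw [decide_eq_true_iff]
      omega
  · have hc : PySem.Set.contains (PySem.Set.ofList engines) "rust/regex" = false := by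
      simp [h]
    rw [if_neg h]
    simp only [hc, Bool.false_eq_true, if_false]
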